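-- pv_equiv track=rewrite | github.com/Gosho69/CustomerSupportHelper | backend/AI_modules/summarization/local_summary.py | _improve_summary
-- ===== SOURCE A (Python) =====
-- def _improve_summary(summary, transcript):
--     if summary.startswith("The customer states:"):
--         lines = transcript.split('\n')
--         customer_lines = [l.replace('Customer:', '').strip() for l in lines if l.startswith('Customer:')]
--         agent_lines = [l.replace('Agent:', '').strip() for l in lines if l.startswith('Agent:')]
--
--         if customer_lines:
--             issue = customer_lines[0][:100]
--             resolution = "Agent assisted with the inquiry."
--             if len(agent_lines) > 1:
--                 last_agent = agent_lines[-1][:80]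
--                 if any(word in last_agent.lower() for word in ['welcome', 'help', 'else', 'thank']):
--                     resolution = "Issue was addressed and call concluded positively."
--
--             summary = f"Customer called about: {issue}. {resolution}"
--
--     return summary
-- ===== SOURCE B (Python) =====
-- def _improve_summary(summary, transcript):
--     if not summary.startswith("The customer states:"):
--         return summary
--     # Locate the first customer line by substring search: a line starts with
--     # 'Customer:' iff the transcript starts with it or '\nCustomer:' occurs.
--     if transcript.startswith('Customer:'):
--         start = 0
--     else:
--         i = transcript.find('\nCustomer:')
--         if i < 0:
--             return summary
--         start = i + 1
--     j = transcript.find('\n', start)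
--     cust_line = transcript[start:] if j < 0 else transcript[start:j]
--     issue = cust_line.replace('Customer:', '').strip()[:100]
--     resolution = "Agent assisted with the inquiry."
--     agent_count = transcript.count('\nAgent:') + (1 if transcript.startswith('Agent:') else 0)
--     if agent_count > 1:
--         k = transcript.rfind('\nAgent:')  # exists: agent_count > 1 forces one
--         m = transcript.find('\n', k + 1)
--         agent_line = transcript[k + 1:] if m < 0 else transcript[k + 1:m]
--         snippet = agent_line.replace('Agent:', '').strip()[:80].lower()
--         if any(w in snippet for w in ('welcome', 'help', 'else', 'thank')):
--             resolution = "Issue was addressed and call concluded positively."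
--     return "Customer called about: " + issue + ". " + resolution
-- ===== Notes on version B (the rewrite author's own statement) =====
-- stated objective: alternative
-- what changed: B never splits the transcript into lines: it locates the first customer line and the last agent line by whole-string substring search (find of '\nCustomer:', rfind of '\nAgent:', cut at the next '\n') and counts agent lines with transcript.count('\nAgent:') plus a startswith check, instead of A's two list comprehensions over transcript.split('\n').
import Mathlib
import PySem

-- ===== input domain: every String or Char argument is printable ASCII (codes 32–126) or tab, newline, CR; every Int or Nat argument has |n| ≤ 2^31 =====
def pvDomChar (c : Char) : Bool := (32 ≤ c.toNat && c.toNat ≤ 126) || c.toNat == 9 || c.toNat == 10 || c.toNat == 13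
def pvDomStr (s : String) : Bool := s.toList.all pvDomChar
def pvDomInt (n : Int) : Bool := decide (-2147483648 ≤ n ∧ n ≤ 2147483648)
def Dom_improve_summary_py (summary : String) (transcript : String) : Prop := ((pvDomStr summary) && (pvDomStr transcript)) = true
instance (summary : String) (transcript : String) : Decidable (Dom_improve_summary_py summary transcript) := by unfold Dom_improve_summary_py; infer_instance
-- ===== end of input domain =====

-- B locates the first customer line and the last agent line by whole-string substring
-- search (find/rfind/count of "\nCustomer:" / "\nAgent:") instead of A's two list
-- comprehensions over transcript.split('\n'); same result, a different algorithm.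

-- ===== PORT A =====
def improve_summary_py (summary : String) (transcript : String) : String :=
  if PySem.Str.startswith summary "The customer states:" then
    let lines := (PySem.Str.split? transcript "\n").getD []
    let customer_lines := (lines.filter (fun l => PySem.Str.startswith l "Customer:")).map
      (fun l => PySem.Str.strip (PySem.Str.replace l "Customer:" ""))
    let agent_lines := (lines.filter (fun l => PySem.Str.startswith l "Agent:")).map
      (fun l => PySem.Str.strip (PySem.Str.replace l "Agent:" ""))
    match customer_lines with
    | [] => summary
    | c0 :: _ =>
      let issue := PySem.Str.slice c0 none (some 100)
      let resolution :=
        if agent_lines.length > 1 then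
          match PySem.List.pyGet? agent_lines (-1) with
          | some la =>
            let last_agent := PySem.Str.slice la none (some 80)
            if ["welcome", "help", "else", "thank"].any
                (fun w => PySem.Str.isIn w (PySem.Str.lower last_agent)) then
              "Issue was addressed and call concluded positively."
            else "Agent assisted with the inquiry."
          | none => "Agent assisted with the inquiry."  -- unreachable: list nonempty under the length guard
        else "Agent assisted with the inquiry."
      "Customer called about: " ++ issue ++ ". " ++ resolution
  else summary

-- ===== PORT B =====
-- Source B: substring search on the whole transcript; 'return summary' on a missing
-- customer line is modelled by the Option 'startOpt'.
def improve_summary_py_alt (summary : String) (transcript : String) : String :=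
  if PySem.Str.startswith summary "The customer states:" = false then summary
  else
    let startOpt : Option Int :=
      if PySem.Str.startswith transcript "Customer:" then some 0
      else
        let i := PySem.Str.find transcript "\nCustomer:"
        if i < 0 then none else some (i + 1)
    match startOpt with
    | none => summary
    | some start =>
      let j := PySem.Str.findFrom transcript "\n" start
      let cust_line := if j < 0 then PySem.Str.slice transcript (some start) none
                       else PySem.Str.slice transcript (some start) (some j)
      let issue := PySem.Str.slice (PySem.Str.strip (PySem.Str.replace cust_line "Customer:" "")) none (some 100)
      let agent_count : Nat := PySem.Str.count transcript "\nAgent:" +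
        (if PySem.Str.startswith transcript "Agent:" then 1 else 0)
      let resolution :=
        if agent_count > 1 then
          let k := PySem.Str.rfind transcript "\nAgent:"
          let m := PySem.Str.findFrom transcript "\n" (k + 1)
          let agent_line := if m < 0 then PySem.Str.slice transcript (some (k + 1)) none
                            else PySem.Str.slice transcript (some (k + 1)) (some m)
          let snippet := PySem.Str.lower (PySem.Str.slice (PySem.Str.strip (PySem.Str.replace agent_line "Agent:" "")) none (some 80))
          if ["welcome", "help", "else", "thank"].any (fun w => PySem.Str.isIn w snippet) then
            "Issue was addressed and call concluded positively."
          else "Agent assisted with the inquiry."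
        else "Agent assisted with the inquiry."
      "Customer called about: " ++ issue ++ ". " ++ resolution

-- ===== PRECONDITION & SPEC =====
def Spec_improve_summary_py (summary : String) (transcript : String) (out : String) : Prop := out = improve_summary_py_alt summary transcript
instance (summary : String) (transcript : String) (out : String) : Decidable (Spec_improve_summary_py summary transcript out) := by unfold Spec_improve_summary_py; infer_instance

-- ===== CLAIM (what is proved, stated in full; the proofs are below) =====
def Claim_equal_improve_summary_py : Prop := ∀ (summary : String) (transcript : String), Dom_improve_summary_py summary transcript → Spec_improve_summary_py summary transcript (improve_summary_py summary transcript)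

-- ===== LEMMAS AND PROOFS =====

-- proof-side helpers: the line list of a char string, and the line starting at index k
def pvLines (cs : List Char) : List (List Char) := PySem.Chars.splitOn cs ['\n']
def pvFirst (cs : List Char) : List Char := cs.takeWhile (fun c => !(c == '\n'))
def pvLine (cs : List Char) (k : Nat) : List Char := pvFirst (cs.drop k)

-- every string is either newline-free or splits at its first newline
lemma pv_decomp (cs : List Char) :
    '\n' ∉ cs ∨ ∃ l0 rest, cs = l0 ++ '\n' :: rest ∧ '\n' ∉ l0 := by
  induction cs with
  | nil => exact Or.inl (by simp)
  | cons c cs' ih =>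
    by_cases hc : c = '\n'
    · exact Or.inr ⟨[], cs', by simp [hc], by simp⟩
    · rcases ih with h | ⟨l0, rest, rfl, hl0⟩
      · exact Or.inl (by simp [h]; exact fun hh => hc hh.symm)
      · exact Or.inr ⟨c :: l0, rest, by simp, by simp [hl0]; exact fun hh => hc hh.symm⟩

lemma pv_go_split_all (l : List Char) (h : '\n' ∉ l) :
    ∀ (f : Nat) (cur : List Char) (acc : List (List Char)),
      PySem.Chars.splitOn.go ['\n'] f l cur acc = ((cur.reverse ++ l) :: acc).reverse := by
  induction l with
  | nil =>
    intro f cur acc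
    rw [PySem.Chars.splitOn.go.eq_def]
    cases f <;> simp
  | cons c rest ih =>
    intro f cur acc
    have hc : c ≠ '\n' := by intro hc; exact h (hc ▸ List.mem_cons_self)
    cases f with
    | zero => rw [PySem.Chars.splitOn.go.eq_def]
    | succ f' =>
      rw [PySem.Chars.splitOn.go.eq_def]
      have hpre : ['\n'].isPrefixOf (c :: rest) = false := by
        simp [List.isPrefixOf]; exact fun hh => absurd hh.symm hc
      simp only [hpre, Bool.false_eq_true, if_false]
      rw [ih (fun hm => h (List.mem_cons_of_mem _ hm)) f' (c :: cur) acc]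
      simp

lemma pv_go_split_cons (l0 : List Char) (h : '\n' ∉ l0) :
    ∀ (f : Nat) (rest cur : List Char) (acc : List (List Char)), l0.length + 1 ≤ f →
      PySem.Chars.splitOn.go ['\n'] f (l0 ++ '\n' :: rest) cur acc =
        PySem.Chars.splitOn.go ['\n'] (f - (l0.length + 1)) rest [] ((cur.reverse ++ l0) :: acc) := by
  induction l0 with
  | nil =>
    intro f rest cur acc hf
    obtain ⟨f', rfl⟩ : ∃ f', f = f' + 1 := ⟨f - 1, by omega⟩
    rw [PySem.Chars.splitOn.go.eq_def]
    simp [List.isPrefixOf]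
  | cons c l0' ih =>
    intro f rest cur acc hf
    have hc : c ≠ '\n' := by intro hc; exact h (hc ▸ List.mem_cons_self)
    obtain ⟨f', rfl⟩ : ∃ f', f = f' + 1 := ⟨f - 1, by omega⟩
    rw [PySem.Chars.splitOn.go.eq_def]
    have hpre : ['\n'].isPrefixOf (c :: (l0' ++ '\n' :: rest)) = false := by
      simp [List.isPrefixOf]; exact fun hh => absurd hh.symm hc
    simp only [List.cons_append, hpre, Bool.false_eq_true, if_false]
    rw [ih (fun hm => h (List.mem_cons_of_mem _ hm)) f' rest (c :: cur) acc (by simpa using hf)]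
    simp only [List.reverse_cons, List.append_assoc, List.cons_append, List.nil_append,
      List.length_cons]
    congr 1
    omega

lemma pv_go_split_main :
    ∀ (n : Nat) (l : List Char) (acc : List (List Char)) (f : Nat), l.length ≤ n → l.length ≤ f →
      PySem.Chars.splitOn.go ['\n'] f l [] acc = acc.reverse ++ PySem.Chars.splitOn l ['\n'] := by
  intro n
  induction n with
  | zero =>
    intro l acc f hn _
    have : l = [] := List.length_eq_zero_iff.mp (by omega)
    subst this
    rw [pv_go_split_all [] (by simp), PySem.Chars.splitOn, pv_go_split_all [] (by simp)]
    simp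
  | succ n' ih =>
    intro l acc f hn hf
    rcases pv_decomp l with hns | ⟨l0, rest, rfl, hl0⟩
    · rw [pv_go_split_all l hns, PySem.Chars.splitOn, pv_go_split_all l hns]
      simp
    · have hlen : (l0 ++ '\n' :: rest).length = l0.length + 1 + rest.length := by
        simp [List.length_append]; omega
      rw [pv_go_split_cons l0 hl0 f rest [] acc (by omega)]
      simp only [List.reverse_nil, List.nil_append]
      rw [ih rest (l0 :: acc) (f - (l0.length + 1)) (by omega) (by omega)]
      conv_rhs => rw [PySem.Chars.splitOn]
      rw [pv_go_split_cons l0 hl0 _ rest [] [] (by omega)]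
      simp only [List.reverse_nil, List.nil_append]
      rw [ih rest [l0] _ (by omega) (by omega)]
      simp

lemma pv_split_nosep (cs : List Char) (h : '\n' ∉ cs) : PySem.Chars.splitOn cs ['\n'] = [cs] := by
  rw [PySem.Chars.splitOn, pv_go_split_all cs h]; simp

lemma pv_split_cons (l0 rest : List Char) (h : '\n' ∉ l0) :
    PySem.Chars.splitOn (l0 ++ '\n' :: rest) ['\n'] = l0 :: PySem.Chars.splitOn rest ['\n'] := by
  rw [PySem.Chars.splitOn, pv_go_split_cons l0 h _ rest [] [] (by simp)]
  rw [pv_go_split_main rest.length rest _ _ le_rfl (by simp)]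
  simp

lemma pv_first_nosep (cs : List Char) (h : '\n' ∉ cs) : pvFirst cs = cs := by
  unfold pvFirst
  exact List.takeWhile_eq_self_iff.mpr (by intro x hx; simp; intro hh; exact h (hh ▸ hx))

lemma pv_first_cons (l0 rest : List Char) (h : '\n' ∉ l0) : pvFirst (l0 ++ '\n' :: rest) = l0 := by
  unfold pvFirst
  induction l0 with
  | nil => simp
  | cons c l0' ih =>
    have hc : c ≠ '\n' := by intro hc; exact h (hc ▸ List.mem_cons_self)
    have := ih (fun hm => h (List.mem_cons_of_mem _ hm))
    simp [hc, this]

lemma pv_lines_eq (cs : List Char) : pvLines cs = pvFirst cs :: (pvLines cs).tail := by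
  rcases pv_decomp cs with h | ⟨l0, rest, rfl, hl0⟩
  · rw [pvLines, pv_split_nosep cs h, pv_first_nosep cs h]
    rfl
  · rw [pvLines, pv_split_cons l0 rest hl0, pv_first_cons l0 rest hl0]
    rfl

lemma pv_lines_tail_cons (l0 rest : List Char) (h : '\n' ∉ l0) :
    (pvLines (l0 ++ '\n' :: rest)).tail = pvLines rest := by
  rw [pvLines, pv_split_cons l0 rest h]; rfl

lemma pv_pref_first (p cs : List Char) (hp : '\n' ∉ p) : p <+: cs ↔ p <+: pvFirst cs := by
  induction p generalizing cs with
  | nil => simp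
  | cons a p' ih =>
    have ha : a ≠ '\n' := by intro hh; exact hp (hh ▸ List.mem_cons_self)
    have hp' : '\n' ∉ p' := fun hm => hp (List.mem_cons_of_mem _ hm)
    cases cs with
    | nil => simp [pvFirst]
    | cons c cs' =>
      by_cases hc : c = '\n'
      · subst hc
        have h1 : ¬ (a :: p' <+: '\n' :: cs') := by
          rw [List.cons_prefix_cons]; rintro ⟨h, -⟩; exact ha h
        have h2 : pvFirst ('\n' :: cs') = [] := by simp [pvFirst]
        simp [h1, h2]
      · have h2 : pvFirst (c :: cs') = c :: pvFirst cs' := by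
          simp [pvFirst, hc]
        rw [h2, List.cons_prefix_cons, List.cons_prefix_cons]
        exact and_congr_right fun _ => ih cs' hp'

lemma pv_find_eq (s sub : List Char) (k : Nat) (h1 : sub <+: s.drop k)
    (h2 : ∀ i < k, ¬ sub <+: s.drop i) : PySem.Chars.find s sub = (k : Int) := by
  have hin : sub <:+: s := h1.isInfix.trans (List.drop_suffix k s).isInfix
  have hnn : 0 ≤ PySem.Chars.find s sub := (PySem.Chars.find_nonneg_iff s sub).mpr hin
  obtain ⟨hsp1, hsp2⟩ := PySem.Chars.find_spec hnn
  set m := (PySem.Chars.find s sub).toNat with hm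
  rcases lt_trichotomy m k with h | h | h
  · exact absurd hsp1 (h2 m h)
  · omega
  · exact absurd h1 (hsp2 k h)

lemma pv_head_drop_ne (s : List Char) (i : Nat) (c : Char) (hi : s[i]? ≠ some c) (p : List Char) :
    ¬ (c :: p) <+: s.drop i := by
  rintro ⟨t, ht⟩
  apply hi
  rw [← List.head?_drop, ← ht]
  rfl

lemma pv_no_pref_inside (l0 rest p : List Char) (h : '\n' ∉ l0) (i : Nat) (hi : i < l0.length) :
    ¬ ('\n' :: p) <+: (l0 ++ '\n' :: rest).drop i := by
  apply pv_head_drop_ne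
  rw [List.getElem?_append_left hi]
  intro hc
  exact h (List.mem_of_getElem? (by simpa using hc))

lemma pv_drop_shift (l0 rest : List Char) (i : Nat) :
    (l0 ++ '\n' :: rest).drop (l0.length + 1 + i) = rest.drop i := by
  have : l0.length + 1 + i = l0.length + (1 + i) := by omega
  rw [this, List.drop_length_add_append, Nat.add_comm 1 i, List.drop_succ_cons]

lemma pv_drop_junction (l0 rest : List Char) :
    (l0 ++ '\n' :: rest).drop l0.length = '\n' :: rest := List.drop_left

-- a prefix occurrence of '\n'::p anywhere implies an occurrence inside one of the cases
lemma pv_occ_cases (l0 rest p : List Char) (hl0 : '\n' ∉ l0) (i : Nat)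
    (hocc : ('\n' :: p) <+: (l0 ++ '\n' :: rest).drop i) :
    (i = l0.length ∧ p <+: rest) ∨ (∃ i', i = l0.length + 1 + i' ∧ ('\n' :: p) <+: rest.drop i') := by
  rcases lt_trichotomy i l0.length with h | h | h
  · exact absurd hocc (pv_no_pref_inside l0 rest p hl0 i h)
  · subst h
    rw [pv_drop_junction] at hocc
    exact Or.inl ⟨rfl, by
      rcases hocc with ⟨t, ht⟩
      exact ⟨t, by injection ht⟩⟩
  · refine Or.inr ⟨i - l0.length - 1, by omega, ?_⟩
    have : i = l0.length + 1 + (i - l0.length - 1) := by omega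
    rw [this, pv_drop_shift] at hocc
    exact hocc

lemma pv_infix_occ (pat cs : List Char) (h : pat <:+: cs) : ∃ i, pat <+: cs.drop i :=
  (PySem.Chars.exists_prefix_drop_iff_isIn pat cs).mpr ((PySem.Chars.isIn_iff_infix pat cs).mpr h)

lemma pv_occ_infix (pat cs : List Char) (i : Nat) (h : pat <+: cs.drop i) : pat <:+: cs :=
  h.isInfix.trans (List.drop_suffix i cs).isInfix

lemma pv_mem_lines_head (cs : List Char) : pvFirst cs ∈ pvLines cs := by
  rw [pv_lines_eq cs]; exact List.mem_cons_self

lemma pv_mem_lines_tail (cs : List Char) {l : List Char} (h : l ∈ (pvLines cs).tail) :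
    l ∈ pvLines cs := by
  rw [pv_lines_eq cs]; exact List.mem_cons_of_mem _ h

lemma pv_find_pat_none_aux (p : List Char) (hp : '\n' ∉ p) :
    ∀ (n : Nat) (cs : List Char), cs.length ≤ n →
      (∀ l ∈ (pvLines cs).tail, ¬ p <+: l) → PySem.Chars.find cs ('\n' :: p) = -1 := by
  intro n
  induction n with
  | zero =>
    intro cs hn h
    have : cs = [] := List.length_eq_zero_iff.mp (by omega)
    subst this
    rw [PySem.Chars.find_eq_neg_one_iff]
    rintro ⟨l, r, heq⟩
    simp at heq
  | succ n' ih =>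
    intro cs hn h
    rcases pv_decomp cs with hns | ⟨l0, rest, rfl, hl0⟩
    · rw [PySem.Chars.find_eq_neg_one_iff]
      rintro ⟨l, r, heq⟩
      exact hns (by rw [← heq]; simp)
    · have hlen : (l0 ++ '\n' :: rest).length = l0.length + 1 + rest.length := by
        simp [List.length_append]; omega
      have h' : ∀ l ∈ pvLines rest, ¬ p <+: l := by
        rw [← pv_lines_tail_cons l0 rest hl0]; exact h
      have hhead : ¬ p <+: pvFirst rest := h' _ (pv_mem_lines_head rest)
      have hrt : ∀ l ∈ (pvLines rest).tail, ¬ p <+: l := fun l hl => h' l (pv_mem_lines_tail rest hl)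
      have hfr := ih rest (by omega) hrt
      rw [PySem.Chars.find_eq_neg_one_iff]
      intro hinf
      obtain ⟨i, hi⟩ := pv_infix_occ _ _ hinf
      rcases pv_occ_cases l0 rest p hl0 i hi with ⟨-, hpr⟩ | ⟨i', -, hocc⟩
      · exact hhead ((pv_pref_first p rest hp).mp hpr)
      · rw [PySem.Chars.find_eq_neg_one_iff] at hfr
        exact hfr (pv_occ_infix _ _ i' hocc)

lemma pv_find_pat_none (p cs : List Char) (hp : '\n' ∉ p)
    (h : ∀ l ∈ (pvLines cs).tail, ¬ p <+: l) : PySem.Chars.find cs ('\n' :: p) = -1 :=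
  pv_find_pat_none_aux p hp cs.length cs le_rfl h

lemma pv_line_shift (l0 rest : List Char) (i : Nat) :
    pvLine (l0 ++ '\n' :: rest) (l0.length + 1 + i) = pvLine rest i := by
  unfold pvLine
  rw [pv_drop_shift]

lemma pv_find_pat_some_aux (p : List Char) (hp : '\n' ∉ p) :
    ∀ (n : Nat) (cs l : List Char), cs.length ≤ n →
      ((pvLines cs).tail).find? (fun x => p.isPrefixOf x) = some l →
      ∃ k : Nat, PySem.Chars.find cs ('\n' :: p) = (k : Int) ∧ k + 1 ≤ cs.length ∧ pvLine cs (k + 1) = l := by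
  intro n
  induction n with
  | zero =>
    intro cs l hn h
    have : cs = [] := List.length_eq_zero_iff.mp (by omega)
    subst this
    simp [pvLines, pv_split_nosep ([] : List Char) (by simp)] at h
  | succ n' ih =>
    intro cs l hn h
    rcases pv_decomp cs with hns | ⟨l0, rest, rfl, hl0⟩
    · rw [pvLines, pv_split_nosep cs hns] at h
      simp at h
    · have hlen : (l0 ++ '\n' :: rest).length = l0.length + 1 + rest.length := by
        simp [List.length_append]; omega
      rw [pv_lines_tail_cons l0 rest hl0] at h
      rw [pv_lines_eq rest] at h
      by_cases hb : p.isPrefixOf (pvFirst rest) = true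
      · rw [List.find?_cons_of_pos hb] at h
        injection h with h
        subst h
        have hpr : p <+: rest := (pv_pref_first p rest hp).mpr (List.isPrefixOf_iff_prefix.mp hb)
        refine ⟨l0.length, ?_, by omega, ?_⟩
        · apply pv_find_eq
          · rw [pv_drop_junction]
            rw [List.cons_prefix_cons]
            exact ⟨rfl, hpr⟩
          · exact fun i hi => pv_no_pref_inside l0 rest p hl0 i hi
        · have := pv_line_shift l0 rest 0
          simpa using this
      · rw [List.find?_cons_of_neg (by simpa using hb)] at h
        obtain ⟨k', hf, hk', hline⟩ := ih rest l (by omega) h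
        have hnn : 0 ≤ PySem.Chars.find rest ('\n' :: p) := by rw [hf]; positivity
        obtain ⟨hsp1, hsp2⟩ := PySem.Chars.find_spec hnn
        rw [hf] at hsp1 hsp2
        simp only [Int.toNat_natCast] at hsp1 hsp2
        refine ⟨l0.length + 1 + k', ?_, by omega, ?_⟩
        · apply pv_find_eq
          · rw [pv_drop_shift]
            exact hsp1
          · intro i hi hocc
            rcases pv_occ_cases l0 rest p hl0 i hocc with ⟨heq, hpr⟩ | ⟨i', heq, hocc'⟩
            · exact hb (List.isPrefixOf_iff_prefix.mpr ((pv_pref_first p rest hp).mp hpr))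
            · exact hsp2 i' (by omega) hocc'
        · have h2 := pv_line_shift l0 rest (k' + 1)
          rw [← hline, ← h2]
          congr 1

lemma pv_find_pat_some (p cs : List Char) (l : List Char) (hp : '\n' ∉ p)
    (h : ((pvLines cs).tail).find? (fun x => p.isPrefixOf x) = some l) :
    ∃ k : Nat, PySem.Chars.find cs ('\n' :: p) = (k : Int) ∧ k + 1 ≤ cs.length ∧ pvLine cs (k + 1) = l :=
  pv_find_pat_some_aux p hp cs.length cs l le_rfl h

lemma pv_rfind_go_eq (s sub : List Char) (k : Nat) (h1 : sub <+: s.drop k)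
    (h2 : ∀ i, k < i → ¬ sub <+: s.drop i) :
    ∀ j, k ≤ j → PySem.Chars.rfind.go s sub j = (k : Int) := by
  intro j
  induction j with
  | zero =>
    intro hj
    have hk : k = 0 := by omega
    subst hk
    rw [PySem.Chars.rfind.go.eq_def]
    simp only [List.isPrefixOf_iff_prefix]
    rw [if_pos (by simpa using h1)]
    rfl
  | succ j' ihj =>
    intro hj
    rw [PySem.Chars.rfind.go.eq_def]
    by_cases hk : k = j' + 1
    · subst hk
      simp only [List.isPrefixOf_iff_prefix]
      rw [if_pos h1]
    · have hlt : ¬ sub <+: s.drop (j' + 1) := h2 (j' + 1) (by omega)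
      simp only [List.isPrefixOf_iff_prefix]
      rw [if_neg hlt]
      exact ihj (by omega)

lemma pv_rfind_eq (s sub : List Char) (k : Nat) (hk : k ≤ s.length) (h1 : sub <+: s.drop k)
    (h2 : ∀ i, k < i → ¬ sub <+: s.drop i) : PySem.Chars.rfind s sub = (k : Int) := by
  rw [PySem.Chars.rfind]
  exact pv_rfind_go_eq s sub k h1 h2 s.length hk

lemma pv_rfind_pat_some_aux (p : List Char) (hp : '\n' ∉ p) :
    ∀ (n : Nat) (cs l : List Char), cs.length ≤ n →
      (((pvLines cs).tail).filter (fun x => p.isPrefixOf x)).getLast? = some l →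
      ∃ k : Nat, PySem.Chars.rfind cs ('\n' :: p) = (k : Int) ∧
        ('\n' :: p) <+: cs.drop k ∧ (∀ i, k < i → ¬ ('\n' :: p) <+: cs.drop i) ∧
        k + 1 ≤ cs.length ∧ pvLine cs (k + 1) = l := by
  intro n
  induction n with
  | zero =>
    intro cs l hn h
    have : cs = [] := List.length_eq_zero_iff.mp (by omega)
    subst this
    simp [pvLines, pv_split_nosep ([] : List Char) (by simp)] at h
  | succ n' ih =>
    intro cs l hn h
    rcases pv_decomp cs with hns | ⟨l0, rest, rfl, hl0⟩
    · rw [pvLines, pv_split_nosep cs hns] at h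
      simp at h
    · have hlen : (l0 ++ '\n' :: rest).length = l0.length + 1 + rest.length := by
        simp [List.length_append]; omega
      rw [pv_lines_tail_cons l0 rest hl0] at h
      rw [pv_lines_eq rest, List.filter_cons] at h
      cases hft : ((pvLines rest).tail).filter (fun x => p.isPrefixOf x) with
      | nil =>
        rw [hft] at h
        by_cases hb : p.isPrefixOf (pvFirst rest) = true
        · rw [if_pos hb] at h
          simp only [List.getLast?_singleton, Option.some_inj] at h
          subst h
          have hpr : p <+: rest := (pv_pref_first p rest hp).mpr (List.isPrefixOf_iff_prefix.mp hb)
          have hnone : ∀ l' ∈ (pvLines rest).tail, ¬ p <+: l' := by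
            intro l' hl' hpl
            have := List.filter_eq_nil_iff.mp hft l' hl'
            exact this (List.isPrefixOf_iff_prefix.mpr hpl)
          have hfr := pv_find_pat_none p rest hp hnone
          rw [PySem.Chars.find_eq_neg_one_iff] at hfr
          have h1 : ('\n' :: p) <+: (l0 ++ '\n' :: rest).drop l0.length := by
            rw [pv_drop_junction, List.cons_prefix_cons]
            exact ⟨rfl, hpr⟩
          have h2 : ∀ i, l0.length < i → ¬ ('\n' :: p) <+: (l0 ++ '\n' :: rest).drop i := by
            intro i hi hocc
            rcases pv_occ_cases l0 rest p hl0 i hocc with ⟨heq, -⟩ | ⟨i', -, hocc'⟩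
            · omega
            · exact hfr (pv_occ_infix _ _ i' hocc')
          refine ⟨l0.length, pv_rfind_eq _ _ _ (by omega) h1 h2, h1, h2, by omega, ?_⟩
          have h3 := pv_line_shift l0 rest 0
          simpa using h3
        · rw [if_neg hb] at h
          simp at h
      | cons y t' =>
        have hgl : (((pvLines rest).tail).filter (fun x => p.isPrefixOf x)).getLast? = some l := by
          by_cases hb : p.isPrefixOf (pvFirst rest) = true
          · rw [if_pos hb, hft, List.getLast?_cons_cons] at h
            rw [hft]; exact h
          · rw [if_neg hb] at h
            exact h
        obtain ⟨k', hrf, h1', h2', hk', hline⟩ := ih rest l (by omega) hgl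
        have h1 : ('\n' :: p) <+: (l0 ++ '\n' :: rest).drop (l0.length + 1 + k') := by
          rw [pv_drop_shift]; exact h1'
        have h2 : ∀ i, l0.length + 1 + k' < i → ¬ ('\n' :: p) <+: (l0 ++ '\n' :: rest).drop i := by
          intro i hi hocc
          rcases pv_occ_cases l0 rest p hl0 i hocc with ⟨heq, -⟩ | ⟨i', heq, hocc'⟩
          · omega
          · exact h2' i' (by omega) hocc'
        refine ⟨l0.length + 1 + k', pv_rfind_eq _ _ _ (by omega) h1 h2, h1, h2, by omega, ?_⟩
        have h3 := pv_line_shift l0 rest (k' + 1)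
        rw [← hline, ← h3]
        congr 1

lemma pv_rfind_pat_some (p cs : List Char) (l : List Char) (hp : '\n' ∉ p)
    (h : (((pvLines cs).tail).filter (fun x => p.isPrefixOf x)).getLast? = some l) :
    ∃ k : Nat, PySem.Chars.rfind cs ('\n' :: p) = (k : Int) ∧ k + 1 ≤ cs.length ∧ pvLine cs (k + 1) = l := by
  obtain ⟨k, hrf, -, -, hk, hline⟩ := pv_rfind_pat_some_aux p hp cs.length cs l le_rfl h
  exact ⟨k, hrf, hk, hline⟩

lemma pv_count_go_nosep (p l : List Char) (h : '\n' ∉ l) :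
    ∀ (f : Nat) (acc : Nat), PySem.Chars.count.go ('\n' :: p) f l acc = acc := by
  induction l with
  | nil =>
    intro f acc
    rw [PySem.Chars.count.go.eq_def]
    cases f <;> simp
  | cons c rest ih =>
    intro f acc
    have hc : c ≠ '\n' := by intro hc; exact h (hc ▸ List.mem_cons_self)
    cases f with
    | zero => rw [PySem.Chars.count.go.eq_def]
    | succ f' =>
      rw [PySem.Chars.count.go.eq_def]
      have hpre : ('\n' :: p).isPrefixOf (c :: rest) = false := by
        simp [List.isPrefixOf]; intro hh; exact absurd hh.symm hc
      simp only [hpre, Bool.false_eq_true, if_false]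
      exact ih (fun hm => h (List.mem_cons_of_mem _ hm)) f' acc

lemma pv_count_go_walk (p l0 : List Char) (h : '\n' ∉ l0) :
    ∀ (f : Nat) (d : List Char) (acc : Nat), l0.length ≤ f →
      PySem.Chars.count.go ('\n' :: p) f (l0 ++ d) acc =
        PySem.Chars.count.go ('\n' :: p) (f - l0.length) d acc := by
  induction l0 with
  | nil => intro f d acc _; simp
  | cons c l0' ih =>
    intro f d acc hf
    have hc : c ≠ '\n' := by intro hc; exact h (hc ▸ List.mem_cons_self)
    obtain ⟨f', rfl⟩ : ∃ f', f = f' + 1 := ⟨f - 1, by simp at hf; omega⟩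
    rw [PySem.Chars.count.go.eq_def]
    have hpre : ('\n' :: p).isPrefixOf (c :: (l0' ++ d)) = false := by
      simp [List.isPrefixOf]; intro hh; exact absurd hh.symm hc
    simp only [List.cons_append, hpre, Bool.false_eq_true, if_false]
    rw [ih (fun hm => h (List.mem_cons_of_mem _ hm)) f' d acc (by simp at hf; omega)]
    congr 1
    simp only [List.length_cons]
    omega

lemma pv_tail_pref (p t : List Char) (hp : '\n' ∉ p) :
    (pvLines (p ++ t)).tail = (pvLines t).tail := by
  rcases pv_decomp t with hns | ⟨t0, r, rfl, ht0⟩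
  · have h1 : '\n' ∉ p ++ t := by
      intro hm
      rcases List.mem_append.mp hm with hm | hm
      · exact hp hm
      · exact hns hm
    rw [pvLines, pv_split_nosep _ h1, pvLines, pv_split_nosep _ hns]
    rfl
  · have h1 : '\n' ∉ p ++ t0 := by
      intro hm
      rcases List.mem_append.mp hm with hm | hm
      · exact hp hm
      · exact ht0 hm
    have : p ++ (t0 ++ '\n' :: r) = (p ++ t0) ++ '\n' :: r := by simp
    rw [this, pv_lines_tail_cons _ _ h1, pv_lines_tail_cons _ _ ht0]

lemma pv_count_go_main (p : List Char) (hp : '\n' ∉ p) :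
    ∀ (n : Nat) (cs : List Char) (acc f : Nat), cs.length ≤ n → cs.length ≤ f →
      PySem.Chars.count.go ('\n' :: p) f cs acc =
        acc + ((pvLines cs).tail).countP (fun x => p.isPrefixOf x) := by
  intro n
  induction n with
  | zero =>
    intro cs acc f hn _
    have : cs = [] := List.length_eq_zero_iff.mp (by omega)
    subst this
    rw [pv_count_go_nosep p [] (by simp)]
    rw [pvLines, pv_split_nosep ([] : List Char) (by simp)]
    simp
  | succ n' ih =>
    intro cs acc f hn hf
    rcases pv_decomp cs with hns | ⟨l0, rest, rfl, hl0⟩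
    · rw [pv_count_go_nosep p cs hns, pvLines, pv_split_nosep cs hns]
      simp
    · have hlen : (l0 ++ '\n' :: rest).length = l0.length + 1 + rest.length := by
        simp [List.length_append]; omega
      rw [pv_count_go_walk p l0 hl0 f ('\n' :: rest) acc (by omega)]
      obtain ⟨f1, hf1⟩ : ∃ f1, f - l0.length = f1 + 1 := ⟨f - l0.length - 1, by omega⟩
      rw [hf1, PySem.Chars.count.go.eq_def]
      have hpre : ('\n' :: p).isPrefixOf ('\n' :: rest) = p.isPrefixOf rest := by
        simp [List.isPrefixOf]
      rw [pv_lines_tail_cons l0 rest hl0, pv_lines_eq rest, List.countP_cons]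
      by_cases hb : p.isPrefixOf rest = true
      · simp only [hpre, hb, if_true]
        obtain ⟨t, rfl⟩ : ∃ t, rest = p ++ t := by
          obtain ⟨t, ht⟩ := List.isPrefixOf_iff_prefix.mp hb
          exact ⟨t, ht.symm⟩
        have hdrop : List.drop ('\n' :: p).length ('\n' :: (p ++ t)) = t := by
          simp only [List.length_cons, List.drop_succ_cons]
          exact List.drop_left
        rw [hdrop]
        rw [ih t (acc + 1) f1 (by simp [List.length_append] at hn ⊢; omega)
          (by simp [List.length_append] at hf ⊢; omega)]
        have hhead : p.isPrefixOf (pvFirst (p ++ t)) = true :=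
          List.isPrefixOf_iff_prefix.mpr
            ((pv_pref_first p (p ++ t) hp).mp ⟨t, rfl⟩)
        rw [hhead, pv_tail_pref p t hp]
        simp
        omega
      · simp only [hpre, hb, Bool.false_eq_true, if_false]
        rw [ih rest acc f1 (by omega) (by omega)]
        have hhead : p.isPrefixOf (pvFirst rest) = false := by
          rw [← Bool.not_eq_true]
          intro hh
          exact hb (List.isPrefixOf_iff_prefix.mpr
            ((pv_pref_first p rest hp).mpr (List.isPrefixOf_iff_prefix.mp hh)))
        rw [hhead]
        simp

lemma pv_count_pat (p cs : List Char) (hp : '\n' ∉ p) :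
    PySem.Chars.count cs ('\n' :: p) = ((pvLines cs).tail).countP (fun x => p.isPrefixOf x) := by
  rw [PySem.Chars.count]
  rw [if_neg (by simp)]
  rw [pv_count_go_main p hp cs.length cs 0 cs.length le_rfl le_rfl]
  omega

lemma pv_take_eq_first (d : List Char) :
    ∀ (m : Nat), ['\n'] <+: d.drop m → (∀ i, i < m → ¬ ['\n'] <+: d.drop i) →
      d.take m = pvFirst d := by
  induction d with
  | nil =>
    intro m h1 _
    rw [List.drop_nil] at h1
    have := List.IsPrefix.length_le h1
    simp at this
  | cons c d' ih =>
    intro m h1 h2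
    cases m with
    | zero =>
      simp only [List.drop_zero, List.cons_prefix_cons] at h1
      obtain ⟨hc, -⟩ := h1
      unfold pvFirst
      simp [← hc]
    | succ m' =>
      have hc : c ≠ '\n' := by
        intro hc
        exact h2 0 (by omega) (by simp [List.cons_prefix_cons, hc])
      unfold pvFirst
      simp only [List.take_succ_cons, List.takeWhile_cons]
      have hcb : (c == '\n') = false := by simp [hc]
      rw [hcb]
      simp only [Bool.not_false, if_true]
      congr 1
      exact ih m' (by simpa using h1) (fun i hi => by
        have := h2 (i + 1) (by omega)
        simpa using this)

lemma pv_extract (cs : List Char) (k : Nat) (hk : k ≤ cs.length) :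
    (if PySem.Chars.findFrom cs ['\n'] (k : Int) none < 0 then PySem.List.slice cs (some (k : Int)) none
     else PySem.List.slice cs (some (k : Int)) (some (PySem.Chars.findFrom cs ['\n'] (k : Int) none))) = pvLine cs k := by
  rw [PySem.Chars.findFrom_natCast cs ['\n'] k hk]
  by_cases hf : PySem.Chars.find (List.drop k cs) ['\n'] = -1
  · rw [if_pos (by rw [hf]; norm_num)]
    rw [PySem.List.slice_from_natCast]
    rw [PySem.Chars.find_eq_neg_one_iff] at hf
    unfold pvLine
    rw [pv_first_nosep _ (fun hm => hf ((List.singleton_infix_iff _ _).mpr hm))]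
  · have hnn : 0 ≤ PySem.Chars.find (List.drop k cs) ['\n'] := by
      rw [PySem.Chars.find_nonneg_iff]
      rw [PySem.Chars.find_eq_neg_one_iff] at hf
      exact not_not.mp hf
    obtain ⟨m, hm⟩ : ∃ m : Nat, PySem.Chars.find (List.drop k cs) ['\n'] = (m : Int) :=
      ⟨(PySem.Chars.find (List.drop k cs) ['\n']).toNat, (Int.toNat_of_nonneg hnn).symm⟩
    rw [hm]
    have hinner : (if ((m : Int) = -1) then (-1 : Int) else (k : Int) + (m : Int)) = (k : Int) + (m : Int) :=
      if_neg (by omega)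
    rw [hinner]
    rw [if_neg (by omega)]
    obtain ⟨hsp1, hsp2⟩ := PySem.Chars.find_spec hnn
    rw [hm] at hsp1 hsp2
    simp only [Int.toNat_natCast] at hsp1 hsp2
    have hcast : (k : Int) + (m : Int) = ((k + m : Nat) : Int) := by push_cast; ring
    rw [hcast, PySem.List.slice_natCast]
    have harith : k + m - k = m := by omega
    rw [harith]
    unfold pvLine
    exact pv_take_eq_first (List.drop k cs) m hsp1 (fun i hi => hsp2 i hi)

lemma pv_isPrefixOf_first (p cs : List Char) (hp : '\n' ∉ p) :
    p.isPrefixOf cs = p.isPrefixOf (pvFirst cs) := by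
  by_cases hh : p <+: cs
  · rw [List.isPrefixOf_iff_prefix.mpr hh,
      List.isPrefixOf_iff_prefix.mpr ((pv_pref_first p cs hp).mp hh)]
  · have hb1 : p.isPrefixOf cs = false := by
      rw [← Bool.not_eq_true]; intro hx; exact hh (List.isPrefixOf_iff_prefix.mp hx)
    have hb2 : p.isPrefixOf (pvFirst cs) = false := by
      rw [← Bool.not_eq_true]; intro hx
      exact hh ((pv_pref_first p cs hp).mpr (List.isPrefixOf_iff_prefix.mp hx))
    rw [hb1, hb2]

lemma pv_startswith_bridge (t : String) (w : String) :
    PySem.Str.startswith t w = w.toList.isPrefixOf t.toList := by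
  rw [PySem.Str.startswith_eq]; rfl

lemma pv_filter_bridge (t : String) (Ls : List String) (w : String)
    (hmap : Ls.map String.toList = pvLines t.toList) :
    (Ls.filter (fun l => PySem.Str.startswith l w)).map String.toList
      = (pvLines t.toList).filter (fun x => w.toList.isPrefixOf x) := by
  rw [← hmap, List.filter_map]
  congr 1

lemma pv_pyGet_neg_one {α : Type} (xs : List α) (h : xs ≠ []) :
    PySem.List.pyGet? xs (-1) = xs.getLast? := by
  have hlen : 1 ≤ xs.length := List.length_pos_iff.mpr h
  simp [PySem.List.pyGet?, PySem.List.pyIdx?, List.getLast?_eq_getElem?, hlen]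

-- the resolution computed by A's agent_lines equals B's count/rfind-based one
lemma pv_res_eq (t : String) (Ls : List String)
    (hmap : Ls.map String.toList = pvLines t.toList) :
    (if ((Ls.filter (fun l => PySem.Str.startswith l "Agent:")).map
          (fun l => PySem.Str.strip (PySem.Str.replace l "Agent:" ""))).length > 1 then
        match PySem.List.pyGet? ((Ls.filter (fun l => PySem.Str.startswith l "Agent:")).map
            (fun l => PySem.Str.strip (PySem.Str.replace l "Agent:" ""))) (-1) with
        | some la =>
          if ["welcome", "help", "else", "thank"].any
              (fun w => PySem.Str.isIn w (PySem.Str.lower (PySem.Str.slice la none (some 80)))) then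
            "Issue was addressed and call concluded positively."
          else "Agent assisted with the inquiry."
        | none => "Agent assisted with the inquiry."
      else "Agent assisted with the inquiry.")
    =
    (if PySem.Str.count t "\nAgent:" + (if PySem.Str.startswith t "Agent:" then 1 else 0) > 1 then
        if ["welcome", "help", "else", "thank"].any (fun w => PySem.Str.isIn w
            (PySem.Str.lower (PySem.Str.slice (PySem.Str.strip (PySem.Str.replace
              (if PySem.Str.findFrom t "\n" (PySem.Str.rfind t "\nAgent:" + 1) < 0 then
                 PySem.Str.slice t (some (PySem.Str.rfind t "\nAgent:" + 1)) none
               else PySem.Str.slice t (some (PySem.Str.rfind t "\nAgent:" + 1))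
                 (some (PySem.Str.findFrom t "\n" (PySem.Str.rfind t "\nAgent:" + 1))))
              "Agent:" "")) none (some 80))))
          then "Issue was addressed and call concluded positively."
          else "Agent assisted with the inquiry."
      else "Agent assisted with the inquiry.") := by
  have hpa_nl : '\n' ∉ "Agent:".toList := by decide
  have hfilter := pv_filter_bridge t Ls "Agent:" hmap
  have hlenA : ((Ls.filter (fun l => PySem.Str.startswith l "Agent:")).map
      (fun l => PySem.Str.strip (PySem.Str.replace l "Agent:" ""))).length
      = ((pvLines t.toList).filter (fun x => "Agent:".toList.isPrefixOf x)).length := by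
    rw [List.length_map, ← hfilter, List.length_map]
  have hcnt : PySem.Str.count t "\nAgent:" + (if PySem.Str.startswith t "Agent:" then 1 else 0)
      = ((pvLines t.toList).filter (fun x => "Agent:".toList.isPrefixOf x)).length := by
    rw [← List.countP_eq_length_filter]
    have h1 : PySem.Str.count t "\nAgent:" = PySem.Chars.count t.toList ('\n' :: "Agent:".toList) := by
      rw [PySem.Str.count_eq]; rfl
    rw [h1, pv_count_pat _ _ hpa_nl]
    have h2 : PySem.Str.startswith t "Agent:" = "Agent:".toList.isPrefixOf (pvFirst t.toList) := by
      rw [pv_startswith_bridge, pv_isPrefixOf_first _ _ hpa_nl]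
    rw [h2]
    conv_rhs => rw [pv_lines_eq t.toList]
    rw [List.countP_cons]
  rw [hlenA, hcnt]
  by_cases hg : ((pvLines t.toList).filter (fun x => "Agent:".toList.isPrefixOf x)).length > 1
  · rw [if_pos hg, if_pos hg]
    -- A's agent_lines are nonempty; its last element
    have hAne : ((Ls.filter (fun l => PySem.Str.startswith l "Agent:")).map
        (fun l => PySem.Str.strip (PySem.Str.replace l "Agent:" ""))) ≠ [] := by
      intro hnil
      have h0 : ((pvLines t.toList).filter (fun x => "Agent:".toList.isPrefixOf x)).length = 0 := by
        rw [← hlenA, hnil]; rfl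
      omega
    rw [pv_pyGet_neg_one _ hAne, List.getLast?_map]
    have hsAne : Ls.filter (fun l => PySem.Str.startswith l "Agent:") ≠ [] := by
      intro hnil; exact hAne (by rw [hnil]; rfl)
    obtain ⟨lA, hlast⟩ : ∃ lA, (Ls.filter (fun l => PySem.Str.startswith l "Agent:")).getLast? = some lA := by
      cases hx : (Ls.filter (fun l => PySem.Str.startswith l "Agent:")).getLast? with
      | none => exact absurd (List.getLast?_eq_none_iff.mp hx) hsAne
      | some lA => exact ⟨lA, rfl⟩
    rw [hlast]
    simp only [Option.map_some]
    -- char level: lA.toList is the last matching line of all lines, hence of the tail lines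
    have hlastc : (((pvLines t.toList).filter (fun x => "Agent:".toList.isPrefixOf x))).getLast? = some lA.toList := by
      rw [← hfilter, List.getLast?_map, hlast]
      rfl
    have hcount2 : ((pvLines t.toList).tail.filter (fun x => "Agent:".toList.isPrefixOf x)) ≠ [] := by
      intro hnil
      have h3 : List.countP (fun x => "Agent:".toList.isPrefixOf x) (pvLines t.toList).tail = 0 := by
        rw [List.countP_eq_length_filter, hnil]; rfl
      have h4 := hg
      rw [← List.countP_eq_length_filter] at h4
      conv_lhs at h4 => rw [pv_lines_eq t.toList]
      rw [List.countP_cons, h3] at h4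
      split_ifs at h4 <;> omega
    have htailc : (((pvLines t.toList).tail.filter (fun x => "Agent:".toList.isPrefixOf x))).getLast? = some lA.toList := by
      conv_lhs at hlastc => rw [pv_lines_eq t.toList]
      rw [List.filter_cons] at hlastc
      cases hft : (pvLines t.toList).tail.filter (fun x => "Agent:".toList.isPrefixOf x) with
      | nil => exact absurd hft hcount2
      | cons y t' =>
        rw [hft] at hlastc
        split_ifs at hlastc with hcond
        · rw [List.getLast?_cons_cons] at hlastc
          exact hlastc
        · exact hlastc
    obtain ⟨k, hrf, hk1, hline⟩ := pv_rfind_pat_some "Agent:".toList t.toList lA.toList hpa_nl htailc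
    have hrfS : PySem.Str.rfind t "\nAgent:" = (k : Int) := by
      rw [PySem.Str.rfind_eq]; exact hrf
    rw [hrfS]
    have hc1 : (k : Int) + 1 = ((k + 1 : Nat) : Int) := by push_cast; ring
    rw [hc1]
    have hAL : (if PySem.Str.findFrom t "\n" ((k + 1 : Nat) : Int) < 0 then
          PySem.Str.slice t (some ((k + 1 : Nat) : Int)) none
        else PySem.Str.slice t (some ((k + 1 : Nat) : Int))
          (some (PySem.Str.findFrom t "\n" ((k + 1 : Nat) : Int)))) = lA := by
      rw [← String.toList_inj]
      rw [apply_ite String.toList]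
      simp only [PySem.Str.toList_slice, PySem.Chars.slice_eq_listSlice, PySem.Str.findFrom_eq]
      rw [(show ("\n".toList) = ['\n'] from rfl)]
      rw [pv_extract t.toList (k + 1) hk1, hline]
    rw [hAL]
  · rw [if_neg hg, if_neg hg]

-- ===== VERDICT (by name: the statement is the Claim_ definition above) =====
theorem improve_summary_py_spec : Claim_equal_improve_summary_py := by
  intro summary t _
  unfold Spec_improve_summary_py improve_summary_py improve_summary_py_alt
  by_cases hs : PySem.Str.startswith summary "The customer states:" = true
  · rw [if_pos hs,
      if_neg (show ¬ (PySem.Str.startswith summary "The customer states:" = false) by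
        rw [hs]; decide)]
    obtain ⟨Ls, hLs, hmap⟩ : ∃ Ls, PySem.Str.split? t "\n" = some Ls ∧
        Ls.map String.toList = pvLines t.toList := by
      have h := PySem.Str.split?_map t "\n"
      cases hO : PySem.Str.split? t "\n" with
      | none =>
        rw [hO] at h
        exfalso
        rw [(show ("\n".toList) = ['\n'] from rfl),
          (show PySem.Chars.split? t.toList ['\n']
            = some (PySem.Chars.splitOn t.toList ['\n']) from rfl)] at h
        simp at h
      | some Ls =>
        refine ⟨Ls, rfl, ?_⟩
        rw [hO] at h
        rw [(show ("\n".toList) = ['\n'] from rfl),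
          (show PySem.Chars.split? t.toList ['\n']
            = some (PySem.Chars.splitOn t.toList ['\n']) from rfl),
          Option.map_some] at h
        exact Option.some_inj.mp h
    rw [hLs, Option.getD_some]
    dsimp only []
    have hpc_nl : '\n' ∉ "Customer:".toList := by decide
    have hfilterC := pv_filter_bridge t Ls "Customer:" hmap
    cases hml : Ls.filter (fun l => PySem.Str.startswith l "Customer:") with
    | nil =>
      simp only [List.map_nil]
      have hnoC : ((pvLines t.toList).filter (fun x => "Customer:".toList.isPrefixOf x)) = [] := by
        rw [← hfilterC, hml]; rfl
      have hnoC' : ∀ x ∈ pvLines t.toList, ¬ ("Customer:".toList.isPrefixOf x = true) :=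
        List.filter_eq_nil_iff.mp hnoC
      have hsw : PySem.Str.startswith t "Customer:" = false := by
        rw [pv_startswith_bridge, pv_isPrefixOf_first _ _ hpc_nl]
        rw [← Bool.not_eq_true]
        exact hnoC' _ (pv_mem_lines_head t.toList)
      rw [hsw]
      simp only [Bool.false_eq_true, if_false]
      have hfind : PySem.Str.find t "\nCustomer:" = -1 := by
        rw [PySem.Str.find_eq]
        rw [(show ("\nCustomer:".toList) = '\n' :: "Customer:".toList from rfl)]
        apply pv_find_pat_none _ _ hpc_nl
        intro l hl hpre
        exact hnoC' l (pv_mem_lines_tail t.toList hl) (List.isPrefixOf_iff_prefix.mpr hpre)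
      rw [hfind, if_pos (show (-1 : Int) < 0 by norm_num)]
    | cons lC restC =>
      simp only [List.map_cons]
      by_cases hcb : PySem.Str.startswith t "Customer:" = true
      · rw [if_pos hcb]
        dsimp only []
        have hq : "Customer:".toList.isPrefixOf (pvFirst t.toList) = true := by
          rw [← pv_isPrefixOf_first _ _ hpc_nl, ← pv_startswith_bridge]; exact hcb
        have h1 : (pvLines t.toList).filter (fun x => "Customer:".toList.isPrefixOf x)
            = lC.toList :: restC.map String.toList := by
          rw [← hfilterC, hml]; rfl
        rw [pv_lines_eq t.toList, List.filter_cons, hq, if_pos rfl] at h1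
        have hheadC : lC.toList = pvFirst t.toList := by
          injection h1 with h1a _
          exact h1a.symm
        have hex := pv_extract t.toList 0 (Nat.zero_le _)
        push_cast at hex
        have hCL : (if PySem.Str.findFrom t "\n" 0 < 0 then PySem.Str.slice t (some 0) none
            else PySem.Str.slice t (some 0) (some (PySem.Str.findFrom t "\n" 0))) = lC := by
          rw [← String.toList_inj, apply_ite String.toList]
          simp only [PySem.Str.toList_slice, PySem.Chars.slice_eq_listSlice, PySem.Str.findFrom_eq]
          rw [(show ("\n".toList) = ['\n'] from rfl)]
          rw [hex]
          unfold pvLine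
          rw [List.drop_zero]
          exact hheadC.symm
        rw [hCL]
        congr 1
        exact pv_res_eq t Ls hmap
      · rw [if_neg hcb]
        have hq0 : "Customer:".toList.isPrefixOf (pvFirst t.toList) = false := by
          rw [← pv_isPrefixOf_first _ _ hpc_nl, ← pv_startswith_bridge]
          rwa [Bool.not_eq_true] at hcb
        have h1 : (pvLines t.toList).filter (fun x => "Customer:".toList.isPrefixOf x)
            = lC.toList :: restC.map String.toList := by
          rw [← hfilterC, hml]; rfl
        rw [pv_lines_eq t.toList, List.filter_cons, hq0] at h1
        simp only [Bool.false_eq_true, if_false] at h1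
        have hfindq : ((pvLines t.toList).tail).find? (fun x => "Customer:".toList.isPrefixOf x)
            = some lC.toList := by
          rw [← List.head?_filter, h1]; rfl
        obtain ⟨k, hfk, hk1, hline⟩ := pv_find_pat_some _ _ _ hpc_nl hfindq
        have hfS : PySem.Str.find t "\nCustomer:" = (k : Int) := by
          rw [PySem.Str.find_eq]; exact hfk
        rw [hfS, if_neg (show ¬ ((k : Int) < 0) by omega)]
        dsimp only []
        have hex := pv_extract t.toList (k + 1) hk1
        push_cast at hex
        have hCL : (if PySem.Str.findFrom t "\n" ((k : Int) + 1) < 0 then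
              PySem.Str.slice t (some ((k : Int) + 1)) none
            else PySem.Str.slice t (some ((k : Int) + 1))
              (some (PySem.Str.findFrom t "\n" ((k : Int) + 1)))) = lC := by
          rw [← String.toList_inj, apply_ite String.toList]
          simp only [PySem.Str.toList_slice, PySem.Chars.slice_eq_listSlice, PySem.Str.findFrom_eq]
          rw [(show ("\n".toList) = ['\n'] from rfl)]
          rw [hex, hline]
        rw [hCL]
        congr 1
        exact pv_res_eq t Ls hmap
  · rw [if_neg hs,
      if_pos (show PySem.Str.startswith summary "The customer states:" = false by
        rwa [Bool.not_eq_true] at hs)]
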